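-- pv_equiv track=rewrite | github.com/S-Christensen/cartographersStudy | scoringCards.py | clawsgravepeaks
-- ===== SOURCE A (Python) =====
-- def dfs(grid, row, col, visited, terrain_type):
--     stack = [(row, col)]
--     cluster = []
--
--     while stack:
--         r, c = stack.pop()
--         if (r, c) not in visited and grid[r][c] == terrain_type:
--             visited.add((r, c))
--             cluster.append((r, c))
--             for dr, dc in [(1, 0), (-1, 0), (0, 1), (0, -1)]:
--                 nr, nc = r + dr, c + dc
--                 if 0 <= nr < len(grid) and 0 <= nc < len(grid[0]):
--                     stack.append((nr, nc))
--     return cluster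
--
-- def has_mountain_and_farm(grid, cluster):
--     mountains = set()
--     farms = set()
--
--     for r, c in cluster:
--         for dr, dc in [(1, 0), (-1, 0), (0, 1), (0, -1)]:
--             nr, nc = r + dr, c + dc
--             if 0 <= nr < len(grid) and 0 <= nc < len(grid[0]):
--                 if grid[nr][nc] == "mountain":
--                     mountains.add((nr, nc))
--                 if grid[nr][nc] == "farm":
--                     farms.add((nr, nc))
--     return mountains, farms
--
-- def clawsgravepeaks(grid):
--     visited = set()
--     clusters = []
--     mountain_count = 0
--
--     for row in range(len(grid)):
--         for col in range(len(grid[0])):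
--             if (row, col) not in visited and grid[row][col] == "water":
--                 cluster = dfs(grid, row, col, visited, "water")
--                 clusters.append(cluster)
--
--     for cluster in clusters:
--         mountains, farms = has_mountain_and_farm(grid, cluster)
--         if farms:
--             mountain_count += len(mountains)
--
--     return mountain_count*5
-- ===== SOURCE B (Python) =====
-- def clawsgravepeaks(grid):
--     # BFS flood fill with an index-pointer queue (mark-on-enqueue), scoring each
--     # component by one pass over the whole grid instead of per-cell neighbour sets.
--     H = len(grid)
--     W = len(grid[0]) if grid else 0
--     seen = set()
--     total = 0
--     for r0 in range(H):
--         for c0 in range(W):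
--             if grid[r0][c0] == "water" and (r0, c0) not in seen:
--                 comp = [(r0, c0)]
--                 seen.add((r0, c0))
--                 i = 0
--                 while i < len(comp):
--                     r, c = comp[i]
--                     i += 1
--                     for nr, nc in ((r + 1, c), (r - 1, c), (r, c + 1), (r, c - 1)):
--                         if 0 <= nr < H and 0 <= nc < W and (nr, nc) not in seen \
--                                 and grid[nr][nc] == "water":
--                             seen.add((nr, nc))
--                             comp.append((nr, nc))
--                 compset = set(comp)
--                 mcount = 0
--                 farm_adjacent = False
--                 for i2 in range(H):
--                     for j2 in range(W):
--                         t = grid[i2][j2]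
--                         if t == "mountain" or t == "farm":
--                             if any(n in compset for n in
--                                    ((i2 + 1, j2), (i2 - 1, j2), (i2, j2 + 1), (i2, j2 - 1))):
--                                 if t == "mountain":
--                                     mcount += 1
--                                 else:
--                                     farm_adjacent = True
--                 if farm_adjacent:
--                     total += mcount
--     return total * 5
-- ===== Notes on version B (the rewrite author's own statement) =====
-- stated objective: alternative
-- what changed: Replaces the LIFO stack DFS with mark-on-pop (and re-pushed duplicates) by a FIFO index-pointer BFS queue with mark-on-enqueue, and replaces the per-cluster neighbour-set accumulation by a single counting pass over the whole grid per component (a membership test against the component set), summing the score on the fly instead of storing all clusters and scoring in a second phase.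
import Mathlib
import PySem

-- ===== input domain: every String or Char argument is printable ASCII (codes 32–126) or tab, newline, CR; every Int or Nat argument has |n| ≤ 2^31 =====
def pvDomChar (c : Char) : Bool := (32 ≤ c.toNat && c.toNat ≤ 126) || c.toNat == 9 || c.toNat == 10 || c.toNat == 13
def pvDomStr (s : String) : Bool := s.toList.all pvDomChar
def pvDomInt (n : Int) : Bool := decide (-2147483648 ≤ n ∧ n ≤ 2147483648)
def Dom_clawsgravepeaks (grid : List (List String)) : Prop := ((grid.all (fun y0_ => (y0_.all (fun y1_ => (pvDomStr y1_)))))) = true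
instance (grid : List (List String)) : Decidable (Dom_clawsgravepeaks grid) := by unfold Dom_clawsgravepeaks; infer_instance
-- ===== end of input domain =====

-- B re-implements the scoring with a FIFO index-pointer flood fill (mark-on-enqueue) and one
-- whole-grid counting pass per component, instead of A's LIFO stack DFS (mark-on-pop) with
-- per-cell neighbour-set accumulation; objective: alternative (same results, different algorithm).

-- ===== PORT A =====
-- shared grid primitives (both Pythons write `grid[r][c]`, the bounds test and the 4-neighbour
-- offsets literally; `pvAt` is exact for the non-negative in-range accesses made under Pre_)
def pvAt (grid : List (List String)) (p : Int × Int) : String :=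
  (PySem.List.pyGet? ((PySem.List.pyGet? grid p.1).getD []) p.2).getD ""

def pvInB (H W : Int) (p : Int × Int) : Bool :=
  decide (0 ≤ p.1 ∧ p.1 < H ∧ 0 ≤ p.2 ∧ p.2 < W)

def pvDirs : List (Int × Int) := [(1, 0), (-1, 0), (0, 1), (0, -1)]

def pvNbrs (p : Int × Int) : List (Int × Int) :=
  pvDirs.map (fun d => (p.1 + d.1, p.2 + d.2))

-- `dfs`: while-loop over an explicit stack (append = push, pop from the end), fuel makes the
-- while total (4*H*W+1 steps always suffice, proved below)
def pvDfsA (grid : List (List String)) (H W : Int) :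
    Nat → List (Int × Int) → PySem.Set (Int × Int) → List (Int × Int) →
    PySem.Set (Int × Int) × List (Int × Int)
  | 0, _, visited, cluster => (visited, cluster)
  | _ + 1, [], visited, cluster => (visited, cluster)
  | fuel + 1, q :: qs, visited, cluster =>
      let p := (q :: qs).getLast (by simp)
      let rest := (q :: qs).dropLast
      if p ∉ visited ∧ pvAt grid p = "water" then
        pvDfsA grid H W fuel
          (pvDirs.foldl (fun st d =>
            let n := (p.1 + d.1, p.2 + d.2)
            if pvInB H W n then st ++ [n] else st) rest)
          (PySem.Set.add visited p) (cluster ++ [p])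
      else
        pvDfsA grid H W fuel rest visited cluster

-- `has_mountain_and_farm`
def pvHMF (grid : List (List String)) (H W : Int) (cluster : List (Int × Int)) :
    PySem.Set (Int × Int) × PySem.Set (Int × Int) :=
  cluster.foldl (fun mf p =>
    pvDirs.foldl (fun mf d =>
      let n := (p.1 + d.1, p.2 + d.2)
      if pvInB H W n then
        (if pvAt grid n = "mountain" then PySem.Set.add mf.1 n else mf.1,
         if pvAt grid n = "farm" then PySem.Set.add mf.2 n else mf.2)
      else mf) mf) (PySem.Set.empty, PySem.Set.empty)

def clawsgravepeaks (grid : List (List String)) : Int :=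
  let H : Int := grid.length
  let W : Int := ((PySem.List.pyGet? grid 0).getD []).length
  let scan := (PySem.List.pyRange 0 H 1).foldl (fun st row =>
      (PySem.List.pyRange 0 W 1).foldl
        (fun (st : PySem.Set (Int × Int) × List (List (Int × Int))) col =>
          if (row, col) ∉ st.1 ∧ pvAt grid (row, col) = "water" then
            let r := pvDfsA grid H W (4 * (H.toNat * W.toNat) + 1) [(row, col)] st.1 []
            (r.1, st.2 ++ [r.2])
          else st) st) (PySem.Set.empty, [])
  let cnt : Int := scan.2.foldl (fun acc cluster =>
      let mf := pvHMF grid H W cluster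
      if mf.2 ≠ [] then acc + (mf.1.length : Int) else acc) 0
  cnt * 5

-- ===== PORT B =====
-- BFS queue as a list with an index pointer i; neighbours are marked seen when enqueued
def pvBfsB (grid : List (List String)) (H W : Int) :
    Nat → List (Int × Int) → Nat → PySem.Set (Int × Int) →
    List (Int × Int) × PySem.Set (Int × Int)
  | 0, comp, _, seen => (comp, seen)
  | fuel + 1, comp, i, seen =>
      if h : i < comp.length then
        let p := comp[i]
        let st := pvDirs.foldl
          (fun (st : List (Int × Int) × PySem.Set (Int × Int)) d =>
            let n := (p.1 + d.1, p.2 + d.2)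
            if pvInB H W n ∧ n ∉ st.2 ∧ pvAt grid n = "water" then
              (st.1 ++ [n], PySem.Set.add st.2 n)
            else st) (comp, seen)
        pvBfsB grid H W fuel st.1 (i + 1) st.2
      else (comp, seen)

def clawsgravepeaks_alt (grid : List (List String)) : Int :=
  let H : Int := grid.length
  let W : Int := ((PySem.List.pyGet? grid 0).getD []).length
  let res := (PySem.List.pyRange 0 H 1).foldl (fun st r0 =>
      (PySem.List.pyRange 0 W 1).foldl
        (fun (st : PySem.Set (Int × Int) × Int) c0 =>
          if pvAt grid (r0, c0) = "water" ∧ (r0, c0) ∉ st.1 then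
            let bb := pvBfsB grid H W (H.toNat * W.toNat + 1) [(r0, c0)] 0
                        (PySem.Set.add st.1 (r0, c0))
            let compset := PySem.Set.ofList bb.1
            let mcf := (PySem.List.pyRange 0 H 1).foldl (fun mc i2 =>
                (PySem.List.pyRange 0 W 1).foldl
                  (fun (mc : Int × Bool) j2 =>
                    let t := pvAt grid (i2, j2)
                    if t = "mountain" ∨ t = "farm" then
                      if (pvNbrs (i2, j2)).any (fun n => PySem.Set.contains compset n) then
                        if t = "mountain" then (mc.1 + 1, mc.2) else (mc.1, true)
                      else mc
                    else mc) mc) ((0 : Int), false)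
            (bb.2, if mcf.2 then st.2 + mcf.1 else st.2)
          else st) st) (PySem.Set.empty, (0 : Int))
  res.2 * 5

-- ===== PRECONDITION & SPEC =====
-- Pre_ excludes exactly the inputs on which the Python A raises IndexError: ragged
-- non-empty grids with a row shorter than row 0 (A indexes grid[r][c] for every c < len(grid[0])).
def Pre_clawsgravepeaks (grid : List (List String)) : Prop :=
  ∀ row ∈ grid, (grid.headD []).length ≤ row.length
instance (grid : List (List String)) : Decidable (Pre_clawsgravepeaks grid) := by
  unfold Pre_clawsgravepeaks; infer_instance

def pvWitness_clawsgravepeaks : List (List String) :=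
  [["water", "farm"], ["mountain", "water"]]

def Spec_clawsgravepeaks (grid : List (List String)) (out : Int) : Prop := out = clawsgravepeaks_alt grid
instance (grid : List (List String)) (out : Int) : Decidable (Spec_clawsgravepeaks grid out) := by unfold Spec_clawsgravepeaks; infer_instance

-- ===== CLAIM (what is proved, stated in full; the proofs are below) =====
def Claim_equal_clawsgravepeaks : Prop := ∀ (grid : List (List String)), Dom_clawsgravepeaks grid → Pre_clawsgravepeaks grid → Spec_clawsgravepeaks grid (clawsgravepeaks grid)

-- ===== LEMMAS AND PROOFS =====

def pvOk (grid : List (List String)) (H W : Int) (p : Int × Int) : Prop :=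
  pvInB H W p = true ∧ pvAt grid p = "water"
def pvClosed (grid : List (List String)) (H W : Int) (V : List (Int × Int)) : Prop :=
  ∀ p ∈ V, ∀ n ∈ pvNbrs p, pvOk grid H W n → n ∈ V
def pvCells (H W : Int) : List (Int × Int) :=
  (PySem.List.pyRange 0 H 1).flatMap (fun r => (PySem.List.pyRange 0 W 1).map (fun c => (r, c)))

inductive pvRch (grid : List (List String)) (H W : Int) (V : List (Int × Int)) :
    (Int × Int) → (Int × Int) → Prop
  | refl (p : Int × Int) : pvOk grid H W p → p ∉ V → pvRch grid H W V p p
  | tail {p q r : Int × Int} : pvRch grid H W V p q → r ∈ pvNbrs q →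
      pvOk grid H W r → r ∉ V → pvRch grid H W V p r

lemma pvNbrs_symm {p q : Int × Int} : q ∈ pvNbrs p ↔ p ∈ pvNbrs q := by
  simp [pvNbrs, pvDirs, Prod.ext_iff]
  constructor <;> (rintro (⟨h1,h2⟩|⟨h1,h2⟩|⟨h1,h2⟩|⟨h1,h2⟩) <;> omega)

lemma mem_pvCells {H W : Int} {p : Int × Int} :
    p ∈ pvCells H W ↔ pvInB H W p = true := by
  simp only [pvCells, List.mem_flatMap, List.mem_map, PySem.List.mem_pyRange_one,
    pvInB, decide_eq_true_eq]
  constructor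
  · rintro ⟨r, hr, c, hc, rfl⟩; exact ⟨hr.1, hr.2, hc.1, hc.2⟩
  · rintro ⟨h1, h2, h3, h4⟩; exact ⟨p.1, ⟨h1, h2⟩, p.2, ⟨h3, h4⟩, (by simp)⟩

lemma nodup_pvCells {H W : Int} : (pvCells H W).Nodup := by
  rw [pvCells, List.nodup_flatMap]
  constructor
  · intro r _
    exact List.Nodup.map (fun a b h => by simpa using h) (PySem.List.nodup_pyRange_one 0 W)
  · refine (PySem.List.pairwise_lt_pyRange_one (a := 0) (b := H)).imp ?_
    intro a b hab x hx hy
    simp only [List.mem_map] at hx hy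
    obtain ⟨c1, _, rfl⟩ := hx
    obtain ⟨c2, _, h⟩ := hy
    have := congrArg Prod.fst h
    simp at this; omega

lemma length_pvCells {H W : Int} : (pvCells H W).length = H.toNat * W.toNat := by
  simp [pvCells, List.length_flatMap, PySem.List.length_pyRange_one, List.map_const']

-- reach lemmas
lemma pvRch_ok_right {grid H W V} {p q : Int × Int} (h : pvRch grid H W V p q) :
    pvOk grid H W q ∧ q ∉ V := by
  cases h with
  | refl h1 h2 => exact ⟨h1, h2⟩
  | tail _ _ h1 h2 => exact ⟨h1, h2⟩

lemma pvRch_trans {grid H W V} {p q r : Int × Int} (h1 : pvRch grid H W V p q)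
    (h2 : pvRch grid H W V q r) : pvRch grid H W V p r := by
  induction h2 with
  | refl => exact h1
  | tail _ hn hok hv ih => exact pvRch.tail ih hn hok hv

lemma pvRch_congr {grid H W V V'} (hV : ∀ x, x ∈ V ↔ x ∈ V') {p q : Int × Int} :
    pvRch grid H W V p q → pvRch grid H W V' p q := by
  intro h
  induction h with
  | refl h1 h2 => exact pvRch.refl _ h1 (fun hc => h2 ((hV _).2 hc))
  | tail _ hn hok hv ih => exact pvRch.tail ih hn hok (fun hc => hv ((hV _).2 hc))

lemma pvRch_of_rch0 {grid H W V} (hcl : pvClosed grid H W V) {p x : Int × Int}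
    (hp : p ∉ V) (h : pvRch grid H W [] p x) : pvRch grid H W V p x := by
  induction h with
  | refl h1 _ => exact pvRch.refl _ h1 hp
  | tail hq hn hok _ ih =>
      refine pvRch.tail ih hn hok (fun hrV => ?_)
      exact (pvRch_ok_right ih).2 (hcl _ hrV _ (pvNbrs_symm.1 hn) (pvRch_ok_right ih).1)

def pvMiss (H W : Int) (v : List (Int × Int)) : Nat :=
  ((pvCells H W).toFinset \ v.toFinset).card

lemma pvMiss_add {H W : Int} {v : List (Int × Int)} {p : Int × Int}
    (hp : pvInB H W p = true) (hnp : p ∉ v) :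
    pvMiss H W (v ++ [p]) + 1 = pvMiss H W v := by
  have hmem : p ∈ (pvCells H W).toFinset \ v.toFinset := by
    simp [List.mem_toFinset, mem_pvCells.2 hp, hnp]
  have h1 : (v ++ [p]).toFinset = insert p v.toFinset := by
    simp [List.toFinset_append]
  have hpos : 0 < ((pvCells H W).toFinset \ v.toFinset).card :=
    Finset.card_pos.mpr ⟨p, hmem⟩
  rw [pvMiss, pvMiss, h1, Finset.sdiff_insert]
  rw [Finset.card_erase_of_mem hmem]
  omega

lemma pvMiss_le {H W : Int} (v : List (Int × Int)) :
    pvMiss H W v ≤ H.toNat * W.toNat := by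
  calc pvMiss H W v ≤ (pvCells H W).toFinset.card :=
        Finset.card_le_card (Finset.sdiff_subset)
    _ = (pvCells H W).length := by
        rw [List.toFinset_card_of_nodup nodup_pvCells]
    _ = H.toNat * W.toNat := length_pvCells

lemma pvPush_eq (H W : Int) (p : Int × Int)
    (rest : List (Int × Int)) :
    pvDirs.foldl (fun st d =>
      let n := (p.1 + d.1, p.2 + d.2)
      if pvInB H W n then st ++ [n] else st) rest
    = rest ++ (pvNbrs p).filter (fun n => pvInB H W n) := by
  cases hb1 : pvInB H W (p.1 + 1, p.2) <;>
    cases hb2 : pvInB H W (p.1 + -1, p.2) <;>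
      cases hb3 : pvInB H W (p.1, p.2 + 1) <;>
        cases hb4 : pvInB H W (p.1, p.2 + -1) <;>
          simp [pvDirs, pvNbrs, List.foldl, List.filter, hb1, hb2, hb3, hb4]

lemma pvDfsA_main (grid : List (List String)) (H W : Int) :
    ∀ (fuel : Nat) (stack : List (Int × Int)) (visited : PySem.Set (Int × Int))
      (cluster : List (Int × Int)),
      visited.Nodup →
      (∀ p ∈ visited, pvInB H W p = true) →
      (∀ p ∈ stack, pvInB H W p = true) →
      stack.length + 4 * pvMiss H W visited ≤ fuel →
      ∃ δ : List (Int × Int),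
        (pvDfsA grid H W fuel stack visited cluster).1 = visited ++ δ ∧
        (pvDfsA grid H W fuel stack visited cluster).2 = cluster ++ δ ∧
        (visited ++ δ).Nodup ∧
        (∀ x ∈ δ, pvOk grid H W x) ∧
        (∀ x ∈ δ, ∃ s ∈ stack, pvOk grid H W s ∧ pvRch grid H W [] s x) ∧
        (∀ s ∈ stack, pvOk grid H W s → s ∈ visited ++ δ) ∧
        (∀ x ∈ δ, ∀ n ∈ pvNbrs x, pvOk grid H W n → n ∈ visited ++ δ) := by
  intro fuel
  induction fuel with
  | zero =>
      intro stack visited cluster h1 h2 h3 h4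
      have hs : stack = [] := by
        cases stack with
        | nil => rfl
        | cons a l => simp at h4
      subst hs
      exact ⟨[], by simp [pvDfsA], by simp [pvDfsA], by simpa using h1,
        by simp, by simp, by simp, by simp⟩
  | succ fuel ih =>
      intro stack visited cluster h1 h2 h3 h4
      cases stack with
      | nil =>
          exact ⟨[], by simp [pvDfsA], by simp [pvDfsA], by simpa using h1,
            by simp, by simp, by simp, by simp⟩
      | cons q qs =>
          set p := (q :: qs).getLast (by simp) with hp
          set rest := (q :: qs).dropLast with hrest
          have hsplit : rest ++ [p] = q :: qs := List.dropLast_append_getLast (by simp)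
          have hmem : ∀ s, s ∈ q :: qs ↔ s ∈ rest ∨ s = p := by
            intro s; rw [← hsplit]; simp
          have hlen : rest.length + 1 = (q :: qs).length := by
            rw [← hsplit]; simp
          have hstep : pvDfsA grid H W (fuel + 1) (q :: qs) visited cluster =
              if p ∉ visited ∧ pvAt grid p = "water" then
                pvDfsA grid H W fuel
                  (rest ++ (pvNbrs p).filter (fun n => pvInB H W n))
                  (PySem.Set.add visited p) (cluster ++ [p])
              else pvDfsA grid H W fuel rest visited cluster := by
            rw [pvDfsA, pvPush_eq]
          by_cases hc : p ∉ visited ∧ pvAt grid p = "water"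
          · have hpin : pvInB H W p = true := h3 p ((hmem p).2 (Or.inr rfl))
            have hok : pvOk grid H W p := ⟨hpin, hc.2⟩
            have haddeq : PySem.Set.add visited p = visited ++ [p] :=
              PySem.Set.add_of_not_mem hc.1
            rw [hstep, if_pos hc, haddeq]
            set stack' := rest ++ (pvNbrs p).filter (fun n => pvInB H W n) with hstack'
            have n1 : (visited ++ [p]).Nodup := by
              refine List.Nodup.append h1 (List.nodup_singleton p) ?_
              intro x hx hy
              simp only [List.mem_singleton] at hy
              subst hy; exact hc.1 hx
            have n2 : ∀ x ∈ visited ++ [p], pvInB H W x = true := by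
              intro x hx
              rcases List.mem_append.1 hx with h | h
              · exact h2 x h
              · simp at h; subst h; exact hpin
            have n3 : ∀ x ∈ stack', pvInB H W x = true := by
              intro x hx
              rcases List.mem_append.1 hx with h | h
              · exact h3 x ((hmem x).2 (Or.inl h))
              · exact (List.of_mem_filter h)
            have n4 : stack'.length + 4 * pvMiss H W (visited ++ [p]) ≤ fuel := by
              have hm := pvMiss_add hpin hc.1
              have hf : ((pvNbrs p).filter (fun n => pvInB H W n)).length ≤ 4 := by
                calc _ ≤ (pvNbrs p).length := List.length_filter_le _ _
                  _ = 4 := by simp [pvNbrs, pvDirs]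
              have hsl : stack'.length = rest.length +
                  ((pvNbrs p).filter (fun n => pvInB H W n)).length := by
                simp [hstack']
              omega
            obtain ⟨δ', e1, e2, e3, e4, e5, e6, e7⟩ :=
              ih stack' (visited ++ [p]) (cluster ++ [p]) n1 n2 n3 n4
            have hre : visited ++ p :: δ' = (visited ++ [p]) ++ δ' := by simp
            refine ⟨p :: δ', ?_, ?_, ?_, ?_, ?_, ?_, ?_⟩
            · rw [e1, hre]
            · rw [e2]; simp
            · rw [hre]; exact e3
            · intro x hx
              rcases List.mem_cons.1 hx with rfl | hx
              · exact hok
              · exact e4 x hx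
            · intro x hx
              rcases List.mem_cons.1 hx with rfl | hx
              · exact ⟨p, (hmem p).2 (Or.inr rfl), hok,
                  pvRch.refl p hok (by simp)⟩
              · obtain ⟨s', hs', hoks', hrch⟩ := e5 x hx
                rcases List.mem_append.1 hs' with h | h
                · exact ⟨s', (hmem s').2 (Or.inl h), hoks', hrch⟩
                · refine ⟨p, (hmem p).2 (Or.inr rfl), hok, ?_⟩
                  have hnb : s' ∈ pvNbrs p := List.mem_of_mem_filter h
                  exact pvRch_trans
                    (pvRch.tail (pvRch.refl p hok (by simp)) hnb hoks' (by simp)) hrch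
            · intro s hs hoks
              rw [hre]
              rcases (hmem s).1 hs with h | h
              · exact e6 s (List.mem_append.2 (Or.inl h)) hoks
              · subst h; simp
            · intro x hx n hn hokn
              rw [hre]
              rcases List.mem_cons.1 hx with rfl | hx
              · have hnf : n ∈ stack' :=
                  List.mem_append.2 (Or.inr (List.mem_filter.2 ⟨hn, hokn.1⟩))
                exact e6 n hnf hokn
              · exact e7 x hx n hn hokn
          · rw [hstep, if_neg hc]
            have n3 : ∀ x ∈ rest, pvInB H W x = true := by
              intro x hx; exact h3 x ((hmem x).2 (Or.inl hx))
            have n4 : rest.length + 4 * pvMiss H W visited ≤ fuel := by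
              simp only [List.length_cons] at h4 hlen
              omega
            obtain ⟨δ', e1, e2, e3, e4, e5, e6, e7⟩ := ih rest visited cluster h1 h2 n3 n4
            refine ⟨δ', e1, e2, e3, e4, ?_, ?_, e7⟩
            · intro x hx
              obtain ⟨s', hs', hoks', hrch⟩ := e5 x hx
              exact ⟨s', (hmem s').2 (Or.inl hs'), hoks', hrch⟩
            · intro s hs hoks
              rcases (hmem s).1 hs with h | h
              · exact e6 s h hoks
              · subst h
                have hv : p ∈ visited := by
                  by_contra hcon
                  exact hc ⟨hcon, hoks.2⟩
                exact List.mem_append.2 (Or.inl hv)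

lemma pvDfsA_char (grid : List (List String)) (H W : Int)
    (visited : PySem.Set (Int × Int)) (seed : Int × Int) (fuel : Nat)
    (h1 : visited.Nodup) (h2 : ∀ p ∈ visited, pvInB H W p = true)
    (hcl : pvClosed grid H W visited) (hok : pvOk grid H W seed)
    (hnv : seed ∉ visited)
    (hfuel : 1 + 4 * pvMiss H W visited ≤ fuel) :
    ∃ δ : List (Int × Int),
      (pvDfsA grid H W fuel [seed] visited []).1 = visited ++ δ ∧
      (pvDfsA grid H W fuel [seed] visited []).2 = δ ∧
      (visited ++ δ).Nodup ∧
      (∀ x ∈ δ, pvOk grid H W x) ∧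
      (∀ x, x ∈ δ ↔ pvRch grid H W visited seed x) ∧
      pvClosed grid H W (visited ++ δ) := by
  obtain ⟨δ, e1, e2, e3, e4, e5, e6, e7⟩ :=
    pvDfsA_main grid H W fuel [seed] visited [] h1 h2
      (by intro x hx; simp at hx; subst hx; exact hok.1) (by simpa using hfuel)
  have hδv : ∀ x ∈ δ, x ∉ visited := by
    intro x hx
    exact fun hv => (List.disjoint_of_nodup_append e3) hv hx
  refine ⟨δ, e1, by simpa using e2, e3, e4, ?_, ?_⟩
  · intro x
    constructor
    · intro hx
      obtain ⟨s, hs, hoks, hrch⟩ := e5 x hx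
      simp at hs; subst hs
      exact pvRch_of_rch0 hcl hnv hrch
    · intro hr
      induction hr with
      | refl h hv =>
          have := e6 seed (by simp) hok
          rcases List.mem_append.1 this with h' | h'
          · exact absurd h' hnv
          · exact h'
      | tail hq hn hokr hrv ih =>
          rename_i b c
          have hbδ : b ∈ δ := ih
          have := e7 b hbδ c hn hokr
          rcases List.mem_append.1 this with h' | h'
          · exact absurd h' hrv
          · exact h'
  · intro x hx n hn hokn
    rcases List.mem_append.1 hx with h | h
    · exact List.mem_append.2 (Or.inl (hcl x h n hn hokn))
    · exact e7 x h n hn hokn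

lemma pvMiss_append {H W : Int} {l v : List (Int × Int)}
    (hin : ∀ x ∈ l, pvInB H W x = true) (hnd : (v ++ l).Nodup) :
    pvMiss H W (v ++ l) + l.length = pvMiss H W v := by
  induction l generalizing v with
  | nil => simp
  | cons x xs ih =>
      have h1 : x ∉ v := fun hv =>
        (List.disjoint_of_nodup_append hnd) hv (List.mem_cons_self)
      have hx : pvInB H W x = true := hin x List.mem_cons_self
      have hre : v ++ x :: xs = (v ++ [x]) ++ xs := by simp
      rw [hre] at hnd ⊢
      have h2 := ih (fun y hy => hin y (List.mem_cons_of_mem _ hy)) hnd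
      have h3 := pvMiss_add (v := v) hx h1
      simp only [List.length_cons]
      omega

lemma pvStepB (grid : List (List String)) (H W : Int) (p : Int × Int) :
    ∀ (ds : List (Int × Int)) (comp : List (Int × Int)) (seen : PySem.Set (Int × Int)),
      seen.Nodup →
      ∃ ε : List (Int × Int),
        (ds.foldl (fun (st : List (Int × Int) × PySem.Set (Int × Int)) d =>
            let n := (p.1 + d.1, p.2 + d.2)
            if pvInB H W n ∧ n ∉ st.2 ∧ pvAt grid n = "water" then
              (st.1 ++ [n], PySem.Set.add st.2 n)
            else st) (comp, seen)).1 = comp ++ ε ∧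
        (ds.foldl (fun (st : List (Int × Int) × PySem.Set (Int × Int)) d =>
            let n := (p.1 + d.1, p.2 + d.2)
            if pvInB H W n ∧ n ∉ st.2 ∧ pvAt grid n = "water" then
              (st.1 ++ [n], PySem.Set.add st.2 n)
            else st) (comp, seen)).2 = seen ++ ε ∧
        (seen ++ ε).Nodup ∧
        (∀ n ∈ ε, (∃ d ∈ ds, n = (p.1 + d.1, p.2 + d.2)) ∧ pvOk grid H W n ∧ n ∉ seen) ∧
        (∀ d ∈ ds, pvOk grid H W (p.1 + d.1, p.2 + d.2) →
          (p.1 + d.1, p.2 + d.2) ∈ seen ++ ε) := by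
  intro ds
  induction ds with
  | nil =>
      intro comp seen h1
      exact ⟨[], by simp, by simp, by simpa using h1, by simp, by simp⟩
  | cons d ds ih =>
      intro comp seen h1
      by_cases hc : pvInB H W (p.1 + d.1, p.2 + d.2) ∧ (p.1 + d.1, p.2 + d.2) ∉ seen ∧
          pvAt grid (p.1 + d.1, p.2 + d.2) = "water"
      · set n := (p.1 + d.1, p.2 + d.2) with hn
        have haddeq : PySem.Set.add seen n = seen ++ [n] :=
          PySem.Set.add_of_not_mem hc.2.1
        have n1 : (seen ++ [n]).Nodup := by
          refine List.Nodup.append h1 (List.nodup_singleton n) ?_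
          intro x hx hy
          simp only [List.mem_singleton] at hy
          subst hy; exact hc.2.1 hx
        obtain ⟨ε', e1, e2, e3, e4, e5⟩ := ih (comp ++ [n]) (seen ++ [n]) n1
        simp only [List.foldl_cons]
        rw [if_pos hc, haddeq]
        refine ⟨n :: ε', by rw [e1]; simp, by rw [e2]; simp,
          by rw [show seen ++ n :: ε' = (seen ++ [n]) ++ ε' by simp]; exact e3, ?_, ?_⟩
        · intro m hm
          rcases List.mem_cons.1 hm with rfl | hm
          · exact ⟨⟨d, List.mem_cons_self, rfl⟩, ⟨hc.1, hc.2.2⟩, hc.2.1⟩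
          · obtain ⟨⟨d', hd', he⟩, hok', hns⟩ := e4 m hm
            refine ⟨⟨d', List.mem_cons_of_mem _ hd', he⟩, hok', ?_⟩
            intro hms; exact hns (List.mem_append.2 (Or.inl hms))
        · intro d' hd' hok'
          rcases List.mem_cons.1 hd' with rfl | hd'
          · rw [← hn]
            exact List.mem_append.2 (Or.inr List.mem_cons_self)
          · have := e5 d' hd' hok'
            simpa using this
      · obtain ⟨ε, e1, e2, e3, e4, e5⟩ := ih comp seen h1
        simp only [List.foldl_cons]
        rw [if_neg hc]
        refine ⟨ε, e1, e2, e3, ?_, ?_⟩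
        · intro m hm
          obtain ⟨⟨d', hd', he⟩, hok', hns⟩ := e4 m hm
          exact ⟨⟨d', List.mem_cons_of_mem _ hd', he⟩, hok', hns⟩
        · intro d' hd' hok'
          rcases List.mem_cons.1 hd' with rfl | hd'
          · have hns : (p.1 + d'.1, p.2 + d'.2) ∈ seen := by
              by_contra hcon
              exact hc ⟨hok'.1, hcon, hok'.2⟩
            exact List.mem_append.2 (Or.inl hns)
          · exact e5 d' hd' hok'

lemma pvBfsB_main (grid : List (List String)) (H W : Int) :
    ∀ (fuel : Nat) (comp : List (Int × Int)) (i : Nat) (seen : PySem.Set (Int × Int)),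
      seen.Nodup →
      (∀ x ∈ seen, pvInB H W x = true) →
      (∃ V0, seen = V0 ++ comp) →
      (∀ x ∈ comp, pvOk grid H W x) →
      i ≤ comp.length →
      (∀ k, (hk : k < comp.length) → k < i →
        ∀ n ∈ pvNbrs comp[k], pvOk grid H W n → n ∈ seen) →
      (comp.length - i) + pvMiss H W seen + 1 ≤ fuel →
      ∃ γ : List (Int × Int),
        (pvBfsB grid H W fuel comp i seen).1 = comp ++ γ ∧
        (pvBfsB grid H W fuel comp i seen).2 = seen ++ γ ∧
        (seen ++ γ).Nodup ∧
        (∀ x ∈ γ, pvOk grid H W x) ∧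
        (∀ x ∈ γ, ∃ s ∈ comp.drop i, pvRch grid H W [] s x) ∧
        (∀ x ∈ comp ++ γ, ∀ n ∈ pvNbrs x, pvOk grid H W n → n ∈ seen ++ γ) := by
  intro fuel
  induction fuel with
  | zero =>
      intro comp i seen _ _ _ _ _ _ hf
      omega
  | succ fuel ih =>
      intro comp i seen h1 h2 h3 h4 h5 h6 hf
      by_cases hi : i < comp.length
      · simp only [pvBfsB, dif_pos hi]
        obtain ⟨ε, e1, e2, e3, e4, e5⟩ := pvStepB grid H W comp[i] pvDirs comp seen h1
        have hεok : ∀ x ∈ ε, pvOk grid H W x := fun x hx => (e4 x hx).2.1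
        have hεnbr : ∀ x ∈ ε, x ∈ pvNbrs comp[i] := by
          intro x hx
          obtain ⟨⟨d, hd, he⟩, _, _⟩ := e4 x hx
          exact he ▸ List.mem_map.2 ⟨d, hd, rfl⟩
        have hpok : pvOk grid H W comp[i] := h4 _ (List.getElem_mem hi)
        have hpdrop : comp[i] ∈ comp.drop i := by
          rw [← List.getElem_cons_drop hi]; exact List.mem_cons_self
        -- IH hypotheses
        obtain ⟨V0, hV0⟩ := h3
        have n2 : ∀ x ∈ seen ++ ε, pvInB H W x = true := by
          intro x hx
          rcases List.mem_append.1 hx with h | h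
          · exact h2 x h
          · exact (hεok x h).1
        have n3 : ∃ V0', seen ++ ε = V0' ++ (comp ++ ε) := by
          exact ⟨V0, by rw [hV0, List.append_assoc]⟩
        have n4 : ∀ x ∈ comp ++ ε, pvOk grid H W x := by
          intro x hx
          rcases List.mem_append.1 hx with h | h
          · exact h4 x h
          · exact hεok x h
        have n5 : i + 1 ≤ (comp ++ ε).length := by simp; omega
        have n6 : ∀ k, (hk : k < (comp ++ ε).length) → k < i + 1 →
            ∀ n ∈ pvNbrs (comp ++ ε)[k], pvOk grid H W n → n ∈ seen ++ ε := by
          intro k hk hki n hn hokn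
          by_cases hklt : k < i
          · have hkc : k < comp.length := lt_of_lt_of_le hklt (le_of_lt hi)
            rw [List.getElem_append_left hkc] at hn
            exact List.mem_append.2 (Or.inl (h6 k hkc hklt n hn hokn))
          · have hk_eq : k = i := by omega
            subst hk_eq
            rw [List.getElem_append_left hi] at hn
            obtain ⟨d, hd, he⟩ := List.mem_map.1 hn
            exact he ▸ e5 d hd (he ▸ hokn)
        have hmiss : pvMiss H W (seen ++ ε) + ε.length = pvMiss H W seen :=
          pvMiss_append (fun x hx => (hεok x hx).1) e3
        have n7 : ((comp ++ ε).length - (i + 1)) + pvMiss H W (seen ++ ε) + 1 ≤ fuel := by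
          simp only [List.length_append]
          omega
        obtain ⟨γ', g1, g2, g3, g4, g5, g6⟩ := ih (comp ++ ε) (i + 1) (seen ++ ε)
          (by exact e3) n2 n3 n4 n5 n6 n7
        rw [e1, e2]
        refine ⟨ε ++ γ', ?_, ?_, ?_, ?_, ?_, ?_⟩
        · rw [g1, List.append_assoc]
        · rw [g2, List.append_assoc]
        · rw [← List.append_assoc]; exact g3
        · intro x hx
          rcases List.mem_append.1 hx with h | h
          · exact hεok x h
          · exact g4 x h
        · intro x hx
          rcases List.mem_append.1 hx with h | h
          · refine ⟨comp[i], hpdrop, ?_⟩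
            exact pvRch.tail (pvRch.refl _ hpok (by simp)) (hεnbr x h)
              (hεok x h) (by simp)
          · obtain ⟨s, hs, hrch⟩ := g5 x h
            rw [List.drop_append_of_le_length (by omega)] at hs
            rcases List.mem_append.1 hs with h' | h'
            · refine ⟨s, ?_, hrch⟩
              rw [← List.getElem_cons_drop hi]
              exact List.mem_cons_of_mem _ h'
            · refine ⟨comp[i], hpdrop, ?_⟩
              exact pvRch_trans
                (pvRch.tail (pvRch.refl _ hpok (by simp)) (hεnbr s h')
                  (hεok s h') (by simp)) hrch
        · intro x hx n hn hokn
          have hx' : x ∈ (comp ++ ε) ++ γ' := by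
            rw [List.append_assoc]; exact hx
          have := g6 x hx' n hn hokn
          rw [List.append_assoc] at this
          exact this
      · simp only [pvBfsB, dif_neg hi]
        refine ⟨[], by simp, by simp, by simpa using h1, by simp, by simp, ?_⟩
        intro x hx n hn hokn
        simp only [List.append_nil] at hx ⊢
        obtain ⟨k, hk, rfl⟩ := List.getElem_of_mem hx
        exact h6 k hk (by omega) n hn hokn

lemma pvBfsB_char (grid : List (List String)) (H W : Int)
    (V0 : PySem.Set (Int × Int)) (seed : Int × Int) (fuel : Nat)
    (h1 : V0.Nodup) (h2 : ∀ p ∈ V0, pvInB H W p = true)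
    (hcl : pvClosed grid H W V0) (hok : pvOk grid H W seed) (hnv : seed ∉ V0)
    (hfuel : 1 + pvMiss H W (V0 ++ [seed]) + 1 ≤ fuel) :
    ∃ C : List (Int × Int),
      (pvBfsB grid H W fuel [seed] 0 (PySem.Set.add V0 seed)).1 = C ∧
      (pvBfsB grid H W fuel [seed] 0 (PySem.Set.add V0 seed)).2 = V0 ++ C ∧
      (V0 ++ C).Nodup ∧
      (∀ x ∈ C, pvOk grid H W x) ∧
      (∀ x, x ∈ C ↔ pvRch grid H W V0 seed x) ∧
      pvClosed grid H W (V0 ++ C) := by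
  have haddeq : PySem.Set.add V0 seed = V0 ++ [seed] := PySem.Set.add_of_not_mem hnv
  rw [haddeq]
  have n1 : (V0 ++ [seed]).Nodup := by
    refine List.Nodup.append h1 (List.nodup_singleton seed) ?_
    intro x hx hy
    simp only [List.mem_singleton] at hy
    subst hy; exact hnv hx
  obtain ⟨γ, g1, g2, g3, g4, g5, g6⟩ :=
    pvBfsB_main grid H W fuel [seed] 0 (V0 ++ [seed]) n1
      (by intro x hx
          rcases List.mem_append.1 hx with h | h
          · exact h2 x h
          · simp at h; subst h; exact hok.1)
      ⟨V0, rfl⟩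
      (by intro x hx; simp at hx; subst hx; exact hok)
      (by simp) (by intro k hk hki; omega) (by simpa using hfuel)
  refine ⟨seed :: γ, by simpa using g1, ?_, ?_, ?_, ?_, ?_⟩
  · rw [g2]; simp
  · have : V0 ++ seed :: γ = (V0 ++ [seed]) ++ γ := by simp
    rw [this]; exact g3
  · intro x hx
    rcases List.mem_cons.1 hx with rfl | hx
    · exact hok
    · exact g4 x hx
  · intro x
    constructor
    · intro hx
      rcases List.mem_cons.1 hx with rfl | hx
      · exact pvRch.refl x hok hnv
      · obtain ⟨s, hs, hrch⟩ := g5 x hx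
        simp at hs; subst hs
        exact pvRch_of_rch0 hcl hnv hrch
    · intro hr
      induction hr with
      | refl h hv => exact List.mem_cons_self
      | tail hq hn hokr hrv ih =>
          rename_i b c
          have hbC : b ∈ [seed] ++ γ := by simpa using ih
          have := g6 b hbC c hn hokr
          have hc' : c ∈ V0 ++ seed :: γ := by
            rw [show V0 ++ seed :: γ = (V0 ++ [seed]) ++ γ by simp]
            exact this
          rcases List.mem_append.1 hc' with h' | h'
          · exact absurd h' hrv
          · exact h'
  · intro x hx n hn hokn
    rw [show V0 ++ seed :: γ = (V0 ++ [seed]) ++ γ by simp] at hx ⊢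
    rcases List.mem_append.1 hx with h | h
    · rcases List.mem_append.1 h with h'' | h''
      · exact List.mem_append.2 (Or.inl (List.mem_append.2 (Or.inl (hcl x h'' n hn hokn))))
      · -- x = seed : covered by g6 since seed ∈ [seed] ++ γ
        simp only [List.mem_singleton] at h''
        subst h''
        exact g6 x (by simp) n hn hokn
    · exact g6 x (by simp [h]) n hn hokn

lemma mem_pvNbrs_iff {p x : Int × Int} :
    x ∈ pvNbrs p ↔ ∃ d ∈ pvDirs, x = (p.1 + d.1, p.2 + d.2) := by
  simp [pvNbrs, eq_comm]

lemma pvClosed_congr {grid : List (List String)} {H W : Int}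
    {V V' : List (Int × Int)} (h : ∀ x, x ∈ V ↔ x ∈ V')
    (hc : pvClosed grid H W V) : pvClosed grid H W V' :=
  fun p hp n hn hok => (h n).1 (hc p ((h p).2 hp) n hn hok)

lemma pvHMF_inner (grid : List (List String)) (H W : Int) (p : Int × Int) :
    ∀ (ds : List (Int × Int)) (mf : PySem.Set (Int × Int) × PySem.Set (Int × Int)),
      mf.1.Nodup → mf.2.Nodup →
      (ds.foldl (fun mf d =>
        let n := (p.1 + d.1, p.2 + d.2)
        if pvInB H W n then
          (if pvAt grid n = "mountain" then PySem.Set.add mf.1 n else mf.1,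
           if pvAt grid n = "farm" then PySem.Set.add mf.2 n else mf.2)
        else mf) mf).1.Nodup ∧
      (ds.foldl (fun mf d =>
        let n := (p.1 + d.1, p.2 + d.2)
        if pvInB H W n then
          (if pvAt grid n = "mountain" then PySem.Set.add mf.1 n else mf.1,
           if pvAt grid n = "farm" then PySem.Set.add mf.2 n else mf.2)
        else mf) mf).2.Nodup ∧
      (∀ x, x ∈ (ds.foldl (fun mf d =>
        let n := (p.1 + d.1, p.2 + d.2)
        if pvInB H W n then
          (if pvAt grid n = "mountain" then PySem.Set.add mf.1 n else mf.1,
           if pvAt grid n = "farm" then PySem.Set.add mf.2 n else mf.2)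
        else mf) mf).1 ↔ x ∈ mf.1 ∨ ((∃ d ∈ ds, x = (p.1 + d.1, p.2 + d.2)) ∧
          pvInB H W x = true ∧ pvAt grid x = "mountain")) ∧
      (∀ x, x ∈ (ds.foldl (fun mf d =>
        let n := (p.1 + d.1, p.2 + d.2)
        if pvInB H W n then
          (if pvAt grid n = "mountain" then PySem.Set.add mf.1 n else mf.1,
           if pvAt grid n = "farm" then PySem.Set.add mf.2 n else mf.2)
        else mf) mf).2 ↔ x ∈ mf.2 ∨ ((∃ d ∈ ds, x = (p.1 + d.1, p.2 + d.2)) ∧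
          pvInB H W x = true ∧ pvAt grid x = "farm")) := by
  intro ds
  induction ds with
  | nil => intro mf n1 n2; exact ⟨n1, n2, by simp, by simp⟩
  | cons d ds ih =>
      intro mf n1 n2
      simp only [List.foldl_cons]
      set n := (p.1 + d.1, p.2 + d.2) with hn
      by_cases hb : pvInB H W n = true
      · set mf' := (if pvAt grid n = "mountain" then PySem.Set.add mf.1 n else mf.1,
          if pvAt grid n = "farm" then PySem.Set.add mf.2 n else mf.2) with hmf'
        have hn1 : mf'.1.Nodup := by
          rw [hmf']; dsimp only
          split_ifs
          · exact PySem.Set.nodup_add _ _ n1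
          · exact n1
        have hn2 : mf'.2.Nodup := by
          rw [hmf']; dsimp only
          split_ifs
          · exact PySem.Set.nodup_add _ _ n2
          · exact n2
        have hm1 : ∀ x, x ∈ mf'.1 ↔ x ∈ mf.1 ∨
            (x = n ∧ pvInB H W x = true ∧ pvAt grid x = "mountain") := by
          intro x
          rw [hmf']; dsimp only
          split_ifs with ht
          · rw [PySem.Set.mem_add]
            constructor
            · rintro (h | rfl)
              · exact Or.inl h
              · exact Or.inr ⟨rfl, hb, ht⟩
            · rintro (h | ⟨rfl, _, _⟩)
              · exact Or.inl h
              · exact Or.inr rfl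
          · constructor
            · exact Or.inl
            · rintro (h | ⟨rfl, _, hmt⟩)
              · exact h
              · exact absurd hmt ht
        have hm2 : ∀ x, x ∈ mf'.2 ↔ x ∈ mf.2 ∨
            (x = n ∧ pvInB H W x = true ∧ pvAt grid x = "farm") := by
          intro x
          rw [hmf']; dsimp only
          split_ifs with ht
          · rw [PySem.Set.mem_add]
            constructor
            · rintro (h | rfl)
              · exact Or.inl h
              · exact Or.inr ⟨rfl, hb, ht⟩
            · rintro (h | ⟨rfl, _, _⟩)
              · exact Or.inl h
              · exact Or.inr rfl
          · constructor
            · exact Or.inl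
            · rintro (h | ⟨rfl, _, hmt⟩)
              · exact h
              · exact absurd hmt ht
        obtain ⟨k1, k2, k3, k4⟩ := ih mf' hn1 hn2
        rw [if_pos hb]
        refine ⟨k1, k2, ?_, ?_⟩
        · intro x
          rw [k3 x, hm1 x]
          constructor
          · rintro ((h | ⟨rfl, hib, hmt⟩) | ⟨⟨d', hd', he⟩, hib, hmt⟩)
            · exact Or.inl h
            · exact Or.inr ⟨⟨d, List.mem_cons_self, hn⟩, hib, hmt⟩
            · exact Or.inr ⟨⟨d', List.mem_cons_of_mem _ hd', he⟩, hib, hmt⟩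
          · rintro (h | ⟨⟨d', hd', he⟩, hib, hmt⟩)
            · exact Or.inl (Or.inl h)
            · rcases List.mem_cons.1 hd' with rfl | hd'
              · exact Or.inl (Or.inr ⟨by rw [he, hn], hib, hmt⟩)
              · exact Or.inr ⟨⟨d', hd', he⟩, hib, hmt⟩
        · intro x
          rw [k4 x, hm2 x]
          constructor
          · rintro ((h | ⟨rfl, hib, hmt⟩) | ⟨⟨d', hd', he⟩, hib, hmt⟩)
            · exact Or.inl h
            · exact Or.inr ⟨⟨d, List.mem_cons_self, hn⟩, hib, hmt⟩
            · exact Or.inr ⟨⟨d', List.mem_cons_of_mem _ hd', he⟩, hib, hmt⟩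
          · rintro (h | ⟨⟨d', hd', he⟩, hib, hmt⟩)
            · exact Or.inl (Or.inl h)
            · rcases List.mem_cons.1 hd' with rfl | hd'
              · exact Or.inl (Or.inr ⟨by rw [he, hn], hib, hmt⟩)
              · exact Or.inr ⟨⟨d', hd', he⟩, hib, hmt⟩
      · rw [if_neg hb]
        obtain ⟨k1, k2, k3, k4⟩ := ih mf n1 n2
        refine ⟨k1, k2, ?_, ?_⟩
        · intro x
          rw [k3 x]
          constructor
          · rintro (h | ⟨⟨d', hd', he⟩, hib, hmt⟩)
            · exact Or.inl h
            · exact Or.inr ⟨⟨d', List.mem_cons_of_mem _ hd', he⟩, hib, hmt⟩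
          · rintro (h | ⟨⟨d', hd', he⟩, hib, hmt⟩)
            · exact Or.inl h
            · rcases List.mem_cons.1 hd' with rfl | hd'
              · refine absurd ?_ hb
                rw [hn, ← he]; exact hib
              · exact Or.inr ⟨⟨d', hd', he⟩, hib, hmt⟩
        · intro x
          rw [k4 x]
          constructor
          · rintro (h | ⟨⟨d', hd', he⟩, hib, hmt⟩)
            · exact Or.inl h
            · exact Or.inr ⟨⟨d', List.mem_cons_of_mem _ hd', he⟩, hib, hmt⟩
          · rintro (h | ⟨⟨d', hd', he⟩, hib, hmt⟩)
            · exact Or.inl h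
            · rcases List.mem_cons.1 hd' with rfl | hd'
              · refine absurd ?_ hb
                rw [hn, ← he]; exact hib
              · exact Or.inr ⟨⟨d', hd', he⟩, hib, hmt⟩

lemma pvHMF_mem (grid : List (List String)) (H W : Int) (cluster : List (Int × Int)) :
    (pvHMF grid H W cluster).1.Nodup ∧ (pvHMF grid H W cluster).2.Nodup ∧
    (∀ x, x ∈ (pvHMF grid H W cluster).1 ↔
      pvInB H W x = true ∧ pvAt grid x = "mountain" ∧ ∃ p ∈ cluster, x ∈ pvNbrs p) ∧
    (∀ x, x ∈ (pvHMF grid H W cluster).2 ↔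
      pvInB H W x = true ∧ pvAt grid x = "farm" ∧ ∃ p ∈ cluster, x ∈ pvNbrs p) := by
  suffices h : ∀ (cl : List (Int × Int)) (mf : PySem.Set (Int × Int) × PySem.Set (Int × Int)),
      mf.1.Nodup → mf.2.Nodup →
      (cl.foldl (fun mf p =>
        pvDirs.foldl (fun mf d =>
          let n := (p.1 + d.1, p.2 + d.2)
          if pvInB H W n then
            (if pvAt grid n = "mountain" then PySem.Set.add mf.1 n else mf.1,
             if pvAt grid n = "farm" then PySem.Set.add mf.2 n else mf.2)
          else mf) mf) mf).1.Nodup ∧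
      (cl.foldl (fun mf p =>
        pvDirs.foldl (fun mf d =>
          let n := (p.1 + d.1, p.2 + d.2)
          if pvInB H W n then
            (if pvAt grid n = "mountain" then PySem.Set.add mf.1 n else mf.1,
             if pvAt grid n = "farm" then PySem.Set.add mf.2 n else mf.2)
          else mf) mf) mf).2.Nodup ∧
      (∀ x, x ∈ (cl.foldl (fun mf p =>
        pvDirs.foldl (fun mf d =>
          let n := (p.1 + d.1, p.2 + d.2)
          if pvInB H W n then
            (if pvAt grid n = "mountain" then PySem.Set.add mf.1 n else mf.1,
             if pvAt grid n = "farm" then PySem.Set.add mf.2 n else mf.2)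
          else mf) mf) mf).1 ↔ x ∈ mf.1 ∨
          (pvInB H W x = true ∧ pvAt grid x = "mountain" ∧ ∃ p ∈ cl, x ∈ pvNbrs p)) ∧
      (∀ x, x ∈ (cl.foldl (fun mf p =>
        pvDirs.foldl (fun mf d =>
          let n := (p.1 + d.1, p.2 + d.2)
          if pvInB H W n then
            (if pvAt grid n = "mountain" then PySem.Set.add mf.1 n else mf.1,
             if pvAt grid n = "farm" then PySem.Set.add mf.2 n else mf.2)
          else mf) mf) mf).2 ↔ x ∈ mf.2 ∨
          (pvInB H W x = true ∧ pvAt grid x = "farm" ∧ ∃ p ∈ cl, x ∈ pvNbrs p)) by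
    obtain ⟨k1, k2, k3, k4⟩ := h cluster (PySem.Set.empty, PySem.Set.empty)
      List.nodup_nil List.nodup_nil
    refine ⟨k1, k2, ?_, ?_⟩
    · intro x
      rw [pvHMF, k3 x]
      simp only [PySem.Set.empty]
      constructor
      · rintro (h | ⟨a, b, c⟩)
        · simp at h
        · exact ⟨a, b, c⟩
      · intro h; exact Or.inr h
    · intro x
      rw [pvHMF, k4 x]
      simp only [PySem.Set.empty]
      constructor
      · rintro (h | ⟨a, b, c⟩)
        · simp at h
        · exact ⟨a, b, c⟩
      · intro h; exact Or.inr h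
  intro cl
  induction cl with
  | nil => intro mf n1 n2; exact ⟨n1, n2, by simp, by simp⟩
  | cons p ps ih =>
      intro mf n1 n2
      simp only [List.foldl_cons]
      obtain ⟨j1, j2, j3, j4⟩ := pvHMF_inner grid H W p pvDirs mf n1 n2
      obtain ⟨k1, k2, k3, k4⟩ := ih _ j1 j2
      refine ⟨k1, k2, ?_, ?_⟩
      · intro x
        rw [k3 x, j3 x]
        rw [← mem_pvNbrs_iff]
        constructor
        · rintro ((h | ⟨hnb, hib, hmt⟩) | ⟨hib, hmt, q, hq, hnb⟩)
          · exact Or.inl h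
          · exact Or.inr ⟨hib, hmt, p, List.mem_cons_self, hnb⟩
          · exact Or.inr ⟨hib, hmt, q, List.mem_cons_of_mem _ hq, hnb⟩
        · rintro (h | ⟨hib, hmt, q, hq, hnb⟩)
          · exact Or.inl (Or.inl h)
          · rcases List.mem_cons.1 hq with rfl | hq
            · exact Or.inl (Or.inr ⟨hnb, hib, hmt⟩)
            · exact Or.inr ⟨hib, hmt, q, hq, hnb⟩
      · intro x
        rw [k4 x, j4 x]
        rw [← mem_pvNbrs_iff]
        constructor
        · rintro ((h | ⟨hnb, hib, hmt⟩) | ⟨hib, hmt, q, hq, hnb⟩)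
          · exact Or.inl h
          · exact Or.inr ⟨hib, hmt, p, List.mem_cons_self, hnb⟩
          · exact Or.inr ⟨hib, hmt, q, List.mem_cons_of_mem _ hq, hnb⟩
        · rintro (h | ⟨hib, hmt, q, hq, hnb⟩)
          · exact Or.inl (Or.inl h)
          · rcases List.mem_cons.1 hq with rfl | hq
            · exact Or.inl (Or.inr ⟨hnb, hib, hmt⟩)
            · exact Or.inr ⟨hib, hmt, q, hq, hnb⟩

lemma pvCnt (grid : List (List String)) (S : List (Int × Int)) :
    ∀ (cs : List (Int × Int)) (mc : Int × Bool),
      (cs.foldl (fun (mc : Int × Bool) x =>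
        if pvAt grid (x.1, x.2) = "mountain" ∨ pvAt grid (x.1, x.2) = "farm" then
          if (pvNbrs (x.1, x.2)).any (fun n => PySem.Set.contains S n) then
            if pvAt grid (x.1, x.2) = "mountain" then (mc.1 + 1, mc.2) else (mc.1, true)
          else mc
        else mc) mc).1 = mc.1 + (cs.countP (fun x =>
          decide (pvAt grid x = "mountain") &&
            (pvNbrs x).any (fun n => PySem.Set.contains S n)) : Int) ∧
      (cs.foldl (fun (mc : Int × Bool) x =>
        if pvAt grid (x.1, x.2) = "mountain" ∨ pvAt grid (x.1, x.2) = "farm" then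
          if (pvNbrs (x.1, x.2)).any (fun n => PySem.Set.contains S n) then
            if pvAt grid (x.1, x.2) = "mountain" then (mc.1 + 1, mc.2) else (mc.1, true)
          else mc
        else mc) mc).2 = (mc.2 || cs.any (fun x =>
          decide (pvAt grid x = "farm") &&
            (pvNbrs x).any (fun n => PySem.Set.contains S n))) := by
  intro cs
  induction cs with
  | nil => intro mc; simp
  | cons x cs ih =>
      intro mc
      simp only [List.foldl_cons, List.countP_cons, List.any_cons, Prod.mk.eta]
      by_cases ha : ((pvNbrs x).any (fun n => PySem.Set.contains S n)) = true
      · by_cases hm : pvAt grid x = "mountain"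
        · have hf : ¬ pvAt grid x = "farm" := by rw [hm]; simp
          have hpm : (decide (pvAt grid x = "mountain") &&
              (pvNbrs x).any (fun n => PySem.Set.contains S n)) = true := by
            rw [Bool.and_eq_true, decide_eq_true_eq]; exact ⟨hm, ha⟩
          have hpf : (decide (pvAt grid x = "farm") &&
              (pvNbrs x).any (fun n => PySem.Set.contains S n)) = false := by
            simp [hf]
          rw [if_pos (Or.inl hm), if_pos ha, if_pos hm]
          obtain ⟨i1, i2⟩ := ih (mc.1 + 1, mc.2)
          refine ⟨?_, ?_⟩
          · rw [i1, hpm]; simp; ring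
          · rw [i2, hpf]; simp
        · by_cases hf : pvAt grid x = "farm"
          · have hpm : (decide (pvAt grid x = "mountain") &&
                (pvNbrs x).any (fun n => PySem.Set.contains S n)) = false := by
              simp [hm]
            have hpf : (decide (pvAt grid x = "farm") &&
                (pvNbrs x).any (fun n => PySem.Set.contains S n)) = true := by
              rw [Bool.and_eq_true, decide_eq_true_eq]; exact ⟨hf, ha⟩
            rw [if_pos (Or.inr hf), if_pos ha, if_neg hm]
            obtain ⟨i1, i2⟩ := ih (mc.1, true)
            refine ⟨?_, ?_⟩
            · rw [i1, hpm]; simp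
            · rw [i2, hpf]; simp
          · have hpm : (decide (pvAt grid x = "mountain") &&
                (pvNbrs x).any (fun n => PySem.Set.contains S n)) = false := by
              simp [hm]
            have hpf : (decide (pvAt grid x = "farm") &&
                (pvNbrs x).any (fun n => PySem.Set.contains S n)) = false := by
              simp [hf]
            rw [if_neg (by tauto)]
            obtain ⟨i1, i2⟩ := ih mc
            refine ⟨?_, ?_⟩
            · rw [i1, hpm]; simp
            · rw [i2, hpf]; simp
      · have hpm : (decide (pvAt grid x = "mountain") &&
            (pvNbrs x).any (fun n => PySem.Set.contains S n)) = false := by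
          simp only [Bool.and_eq_false_iff]
          exact Or.inr (by simpa using ha)
        have hpf : (decide (pvAt grid x = "farm") &&
            (pvNbrs x).any (fun n => PySem.Set.contains S n)) = false := by
          simp only [Bool.and_eq_false_iff]
          exact Or.inr (by simpa using ha)
        by_cases hmf : pvAt grid x = "mountain" ∨ pvAt grid x = "farm"
        · rw [if_pos hmf, if_neg ha]
          obtain ⟨i1, i2⟩ := ih mc
          refine ⟨?_, ?_⟩
          · rw [i1, hpm]; simp
          · rw [i2, hpf]; simp
        · rw [if_neg hmf]
          obtain ⟨i1, i2⟩ := ih mc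
          refine ⟨?_, ?_⟩
          · rw [i1, hpm]; simp
          · rw [i2, hpf]; simp

lemma pvFoldFlat_aux {σ : Type} (h : σ → Int → Int → σ) (cl : List Int) :
    ∀ (rl : List Int) (init : σ),
      rl.foldl (fun st r => cl.foldl (fun st c => h st r c) st) init
      = (rl.flatMap (fun r => cl.map (fun c => (r, c)))).foldl
          (fun st rc => h st rc.1 rc.2) init := by
  intro rl
  induction rl with
  | nil => simp
  | cons r rs ih =>
      intro init
      simp only [List.flatMap_cons, List.foldl_cons, List.foldl_append, List.foldl_map]
      rw [ih]

lemma pvScoring (grid : List (List String)) (H W : Int) (X Y : List (Int × Int))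
    (hmem : ∀ n, n ∈ X ↔ n ∈ Y) :
    ((pvCells H W).foldl (fun (mc : Int × Bool) x =>
        if pvAt grid (x.1, x.2) = "mountain" ∨ pvAt grid (x.1, x.2) = "farm" then
          if (pvNbrs (x.1, x.2)).any (fun n => PySem.Set.contains (PySem.Set.ofList Y) n) then
            if pvAt grid (x.1, x.2) = "mountain" then (mc.1 + 1, mc.2) else (mc.1, true)
          else mc
        else mc) ((0 : Int), false)).1 = ((pvHMF grid H W X).1.length : Int) ∧
    (((pvCells H W).foldl (fun (mc : Int × Bool) x =>
        if pvAt grid (x.1, x.2) = "mountain" ∨ pvAt grid (x.1, x.2) = "farm" then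
          if (pvNbrs (x.1, x.2)).any (fun n => PySem.Set.contains (PySem.Set.ofList Y) n) then
            if pvAt grid (x.1, x.2) = "mountain" then (mc.1 + 1, mc.2) else (mc.1, true)
          else mc
        else mc) ((0 : Int), false)).2 = true ↔ (pvHMF grid H W X).2 ≠ []) := by
  obtain ⟨i1, i2⟩ := pvCnt grid (PySem.Set.ofList Y) (pvCells H W) ((0 : Int), false)
  obtain ⟨k1, k2, k3, k4⟩ := pvHMF_mem grid H W X
  have hany : ∀ a : Int × Int, ((pvNbrs a).any
      (fun n => PySem.Set.contains (PySem.Set.ofList Y) n) = true) ↔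
      ∃ p ∈ X, a ∈ pvNbrs p := by
    intro a
    rw [List.any_eq_true]
    constructor
    · rintro ⟨n, hn, hc⟩
      have : n ∈ Y := (PySem.Set.mem_ofList _ _).1 ((PySem.Set.contains_iff _ _).1 hc)
      exact ⟨n, (hmem n).2 this, pvNbrs_symm.1 hn⟩
    · rintro ⟨p, hp, hnb⟩
      refine ⟨p, pvNbrs_symm.1 hnb, ?_⟩
      exact (PySem.Set.contains_iff _ _).2 ((PySem.Set.mem_ofList _ _).2 ((hmem p).1 hp))
  constructor
  · rw [i1]
    have hcnt : (pvCells H W).countP (fun x =>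
        decide (pvAt grid x = "mountain") &&
          (pvNbrs x).any (fun n => PySem.Set.contains (PySem.Set.ofList Y) n))
        = (pvHMF grid H W X).1.length := by
      rw [List.countP_eq_length_filter]
      refine List.Perm.length_eq ?_
      refine (List.perm_ext_iff_of_nodup (List.Nodup.filter _ nodup_pvCells) k1).2 ?_
      intro a
      rw [List.mem_filter, k3 a, mem_pvCells]
      constructor
      · rintro ⟨hc, hp⟩
        rw [Bool.and_eq_true, decide_eq_true_eq] at hp
        exact ⟨hc, hp.1, (hany a).1 hp.2⟩
      · rintro ⟨hib, hmt, hex⟩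
        refine ⟨hib, ?_⟩
        rw [Bool.and_eq_true, decide_eq_true_eq]
        exact ⟨hmt, (hany a).2 hex⟩
    rw [hcnt]; ring
  · rw [i2]
    simp only [Bool.false_or]
    rw [List.any_eq_true]
    constructor
    · rintro ⟨a, hc, hp⟩
      rw [Bool.and_eq_true, decide_eq_true_eq] at hp
      have : a ∈ (pvHMF grid H W X).2 :=
        (k4 a).2 ⟨mem_pvCells.1 hc, hp.1, (hany a).1 hp.2⟩
      intro hnil
      rw [hnil] at this; simp at this
    · intro hne
      obtain ⟨a, ha⟩ := List.exists_mem_of_ne_nil _ hne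
      obtain ⟨hib, hmt, hex⟩ := (k4 a).1 ha
      refine ⟨a, mem_pvCells.2 hib, ?_⟩
      rw [Bool.and_eq_true, decide_eq_true_eq]
      exact ⟨hmt, (hany a).2 hex⟩

def pvScoreA (grid : List (List String)) (H W : Int) (cls : List (List (Int × Int))) : Int :=
  cls.foldl (fun acc cluster =>
      let mf := pvHMF grid H W cluster
      if mf.2 ≠ [] then acc + (mf.1.length : Int) else acc) 0

def pvRel (grid : List (List String)) (H W : Int)
    (sa : PySem.Set (Int × Int) × List (List (Int × Int)))
    (sb : PySem.Set (Int × Int) × Int) : Prop :=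
  sa.1.Nodup ∧ sb.1.Nodup ∧ (∀ x, x ∈ sa.1 ↔ x ∈ sb.1) ∧
  (∀ x ∈ sa.1, pvInB H W x = true) ∧ pvClosed grid H W sa.1 ∧
  sb.2 = pvScoreA grid H W sa.2

lemma pvScoreA_snoc (grid : List (List String)) (H W : Int)
    (cls : List (List (Int × Int))) (cl : List (Int × Int)) :
    pvScoreA grid H W (cls ++ [cl]) =
      if (pvHMF grid H W cl).2 ≠ [] then
        pvScoreA grid H W cls + ((pvHMF grid H W cl).1.length : Int)
      else pvScoreA grid H W cls := by
  simp [pvScoreA, List.foldl_append]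

lemma pvCntFlat (grid : List (List String)) (H W : Int) (C : List (Int × Int))
    (init : Int × Bool) :
    List.foldl (fun mc i2 => List.foldl (fun (mc : Int × Bool) j2 =>
      if pvAt grid (i2, j2) = "mountain" ∨ pvAt grid (i2, j2) = "farm" then
        if (pvNbrs (i2, j2)).any (fun n => (PySem.Set.ofList C).contains n) then
          if pvAt grid (i2, j2) = "mountain" then (mc.1 + 1, mc.2) else (mc.1, true)
        else mc
      else mc) mc (PySem.List.pyRange 0 W 1)) init (PySem.List.pyRange 0 H 1)
    = (pvCells H W).foldl (fun (mc : Int × Bool) x =>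
        if pvAt grid (x.1, x.2) = "mountain" ∨ pvAt grid (x.1, x.2) = "farm" then
          if (pvNbrs (x.1, x.2)).any (fun n => PySem.Set.contains (PySem.Set.ofList C) n) then
            if pvAt grid (x.1, x.2) = "mountain" then (mc.1 + 1, mc.2) else (mc.1, true)
          else mc
        else mc) init := by
  exact pvFoldFlat_aux _ _ _ _

lemma pvColsLoop (grid : List (List String)) (H W row : Int)
    (hrow : row ∈ PySem.List.pyRange 0 H 1) :
    ∀ (cols : List Int) (sa : PySem.Set (Int × Int) × List (List (Int × Int)))
      (sb : PySem.Set (Int × Int) × Int),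
      (∀ c ∈ cols, c ∈ PySem.List.pyRange 0 W 1) →
      pvRel grid H W sa sb →
      pvRel grid H W
        (cols.foldl (fun (st : PySem.Set (Int × Int) × List (List (Int × Int))) col =>
            if (row, col) ∉ st.1 ∧ pvAt grid (row, col) = "water" then
              ((pvDfsA grid H W (4 * (H.toNat * W.toNat) + 1) [(row, col)] st.1 []).1,
               st.2 ++ [(pvDfsA grid H W (4 * (H.toNat * W.toNat) + 1) [(row, col)] st.1 []).2])
            else st) sa)
        (cols.foldl (fun (st : PySem.Set (Int × Int) × Int) c0 =>
            if pvAt grid (row, c0) = "water" ∧ (row, c0) ∉ st.1 then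
              ((pvBfsB grid H W (H.toNat * W.toNat + 1) [(row, c0)] 0 (st.1.add (row, c0))).2,
               if (List.foldl (fun mc i2 => List.foldl (fun (mc : Int × Bool) j2 =>
                     if pvAt grid (i2, j2) = "mountain" ∨ pvAt grid (i2, j2) = "farm" then
                       if (pvNbrs (i2, j2)).any (fun n =>
                           (PySem.Set.ofList (pvBfsB grid H W (H.toNat * W.toNat + 1)
                             [(row, c0)] 0 (st.1.add (row, c0))).1).contains n) then
                         if pvAt grid (i2, j2) = "mountain" then (mc.1 + 1, mc.2)
                         else (mc.1, true)
                       else mc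
                     else mc) mc (PySem.List.pyRange 0 W 1)) ((0 : Int), false)
                    (PySem.List.pyRange 0 H 1)).2 then
                 st.2 + (List.foldl (fun mc i2 => List.foldl (fun (mc : Int × Bool) j2 =>
                     if pvAt grid (i2, j2) = "mountain" ∨ pvAt grid (i2, j2) = "farm" then
                       if (pvNbrs (i2, j2)).any (fun n =>
                           (PySem.Set.ofList (pvBfsB grid H W (H.toNat * W.toNat + 1)
                             [(row, c0)] 0 (st.1.add (row, c0))).1).contains n) then
                         if pvAt grid (i2, j2) = "mountain" then (mc.1 + 1, mc.2)
                         else (mc.1, true)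
                       else mc
                     else mc) mc (PySem.List.pyRange 0 W 1)) ((0 : Int), false)
                    (PySem.List.pyRange 0 H 1)).1
               else st.2)
            else st) sb) := by
  intro cols
  induction cols with
  | nil => intro sa sb _ hrel; simpa using hrel
  | cons col cols ih =>
      intro sa sb hcols hrel
      simp only [List.foldl_cons]
      refine ih _ _ (fun c hc => hcols c (List.mem_cons_of_mem _ hc)) ?_
      obtain ⟨r1, r2, r3, r4, r5, r6⟩ := hrel
      have hcr := PySem.List.mem_pyRange_one.1 hrow
      have hcc := PySem.List.mem_pyRange_one.1 (hcols col List.mem_cons_self)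
      have hcell : (row, col) ∈ pvCells H W := by
        rw [mem_pvCells, pvInB, decide_eq_true_eq]
        exact ⟨hcr.1, hcr.2, hcc.1, hcc.2⟩
      by_cases hw : pvAt grid (row, col) = "water" ∧ (row, col) ∉ sa.1
      · have hwB : pvAt grid (row, col) = "water" ∧ (row, col) ∉ sb.1 :=
          ⟨hw.1, fun h => hw.2 ((r3 _).2 h)⟩
        have hwA : (row, col) ∉ sa.1 ∧ pvAt grid (row, col) = "water" := ⟨hw.2, hw.1⟩
        rw [if_pos hwA, if_pos hwB]
        have hok : pvOk grid H W (row, col) := ⟨mem_pvCells.1 hcell, hw.1⟩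
        obtain ⟨δ, e1, e2, e3, e4, e5, e6⟩ := pvDfsA_char grid H W sa.1 (row, col)
          (4 * (H.toNat * W.toNat) + 1) r1 r4 r5 hok hw.2
          (by have := pvMiss_le (H := H) (W := W) sa.1; omega)
        have hinb : ∀ x ∈ sb.1, pvInB H W x = true := fun x hx => r4 x ((r3 x).2 hx)
        have hclb : pvClosed grid H W sb.1 := pvClosed_congr r3 r5
        have hfB : 1 + pvMiss H W (sb.1 ++ [(row, col)]) + 1 ≤ H.toNat * W.toNat + 1 := by
          have h1 := pvMiss_add (v := sb.1) (mem_pvCells.1 hcell) hwB.2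
          have h2 := pvMiss_le (H := H) (W := W) sb.1
          omega
        obtain ⟨C, f1, f2, f3, f4, f5, f6⟩ := pvBfsB_char grid H W sb.1 (row, col)
          (H.toNat * W.toNat + 1) r2 hinb hclb hok hwB.2 hfB
        have hδC : ∀ x, x ∈ δ ↔ x ∈ C := by
          intro x
          rw [e5 x, f5 x]
          exact ⟨pvRch_congr r3, pvRch_congr (fun y => (r3 y).symm)⟩
        rw [e1, e2, f1, f2, pvCntFlat]
        obtain ⟨s1, s2⟩ := pvScoring grid H W δ C hδC
        refine ⟨e3, f3, ?_, ?_, e6, ?_⟩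
        · intro x
          simp only [List.mem_append]
          constructor
          · rintro (h | h)
            · exact Or.inl ((r3 x).1 h)
            · exact Or.inr ((hδC x).1 h)
          · rintro (h | h)
            · exact Or.inl ((r3 x).2 h)
            · exact Or.inr ((hδC x).2 h)
        · intro x hx
          rcases List.mem_append.1 hx with h | h
          · exact r4 x h
          · exact (e4 x h).1
        · rw [pvScoreA_snoc]
          cases hb2 : ((pvCells H W).foldl (fun (mc : Int × Bool) x =>
              if pvAt grid (x.1, x.2) = "mountain" ∨ pvAt grid (x.1, x.2) = "farm" then
                if (pvNbrs (x.1, x.2)).any (fun n =>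
                    PySem.Set.contains (PySem.Set.ofList C) n) then
                  if pvAt grid (x.1, x.2) = "mountain" then (mc.1 + 1, mc.2)
                  else (mc.1, true)
                else mc
              else mc) ((0 : Int), false)).2
          · have hne : ¬ (pvHMF grid H W δ).2 ≠ [] := by
              rw [← s2, hb2]; simp
            rw [if_neg hne, if_neg (by simp), r6]
          · have hne : (pvHMF grid H W δ).2 ≠ [] := s2.1 hb2
            rw [if_pos hne, if_pos (by simp), r6, s1]
      · have hwA' : ¬ ((row, col) ∉ sa.1 ∧ pvAt grid (row, col) = "water") :=
          fun h => hw ⟨h.2, h.1⟩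
        have hwB' : ¬ (pvAt grid (row, col) = "water" ∧ (row, col) ∉ sb.1) :=
          fun h => hw ⟨h.1, fun hm => h.2 ((r3 _).1 hm)⟩
        rw [if_neg hwA', if_neg hwB']
        exact ⟨r1, r2, r3, r4, r5, r6⟩

lemma pvRowsLoop (grid : List (List String)) (H W : Int) :
    ∀ (rows : List Int) (sa : PySem.Set (Int × Int) × List (List (Int × Int)))
      (sb : PySem.Set (Int × Int) × Int),
      (∀ r ∈ rows, r ∈ PySem.List.pyRange 0 H 1) →
      pvRel grid H W sa sb →
      pvRel grid H W
        (rows.foldl (fun st row =>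
          List.foldl (fun (st : PySem.Set (Int × Int) × List (List (Int × Int))) col =>
            if (row, col) ∉ st.1 ∧ pvAt grid (row, col) = "water" then
              ((pvDfsA grid H W (4 * (H.toNat * W.toNat) + 1) [(row, col)] st.1 []).1,
               st.2 ++ [(pvDfsA grid H W (4 * (H.toNat * W.toNat) + 1) [(row, col)] st.1 []).2])
            else st) st (PySem.List.pyRange 0 W 1)) sa)
        (rows.foldl (fun st r0 =>
          List.foldl (fun (st : PySem.Set (Int × Int) × Int) c0 =>
            if pvAt grid (r0, c0) = "water" ∧ (r0, c0) ∉ st.1 then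
              ((pvBfsB grid H W (H.toNat * W.toNat + 1) [(r0, c0)] 0 (st.1.add (r0, c0))).2,
               if (List.foldl (fun mc i2 => List.foldl (fun (mc : Int × Bool) j2 =>
                     if pvAt grid (i2, j2) = "mountain" ∨ pvAt grid (i2, j2) = "farm" then
                       if (pvNbrs (i2, j2)).any (fun n =>
                           (PySem.Set.ofList (pvBfsB grid H W (H.toNat * W.toNat + 1)
                             [(r0, c0)] 0 (st.1.add (r0, c0))).1).contains n) then
                         if pvAt grid (i2, j2) = "mountain" then (mc.1 + 1, mc.2)
                         else (mc.1, true)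
                       else mc
                     else mc) mc (PySem.List.pyRange 0 W 1)) ((0 : Int), false)
                    (PySem.List.pyRange 0 H 1)).2 then
                 st.2 + (List.foldl (fun mc i2 => List.foldl (fun (mc : Int × Bool) j2 =>
                     if pvAt grid (i2, j2) = "mountain" ∨ pvAt grid (i2, j2) = "farm" then
                       if (pvNbrs (i2, j2)).any (fun n =>
                           (PySem.Set.ofList (pvBfsB grid H W (H.toNat * W.toNat + 1)
                             [(r0, c0)] 0 (st.1.add (r0, c0))).1).contains n) then
                         if pvAt grid (i2, j2) = "mountain" then (mc.1 + 1, mc.2)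
                         else (mc.1, true)
                       else mc
                     else mc) mc (PySem.List.pyRange 0 W 1)) ((0 : Int), false)
                    (PySem.List.pyRange 0 H 1)).1
               else st.2)
            else st) st (PySem.List.pyRange 0 W 1)) sb) := by
  intro rows
  induction rows with
  | nil => intro sa sb _ hrel; simpa using hrel
  | cons r rs ih =>
      intro sa sb hrows hrel
      simp only [List.foldl_cons]
      refine ih _ _ (fun x hx => hrows x (List.mem_cons_of_mem _ hx)) ?_
      exact pvColsLoop grid H W r (hrows r List.mem_cons_self)
        (PySem.List.pyRange 0 W 1) sa sb (fun c hc => hc) hrel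

lemma pvMainEq (grid : List (List String)) : clawsgravepeaks grid = clawsgravepeaks_alt grid := by
  simp only [clawsgravepeaks, clawsgravepeaks_alt]
  have h := pvRowsLoop grid (grid.length : Int)
      ((((PySem.List.pyGet? grid 0).getD []).length : Int))
      (PySem.List.pyRange 0 (grid.length : Int) 1)
      (PySem.Set.empty, []) (PySem.Set.empty, (0 : Int))
      (fun r hr => hr)
      ⟨List.nodup_nil, List.nodup_nil, by simp [PySem.Set.empty],
       by simp [PySem.Set.empty], by intro p hp; simp [PySem.Set.empty] at hp,
       by simp [pvScoreA]⟩
  obtain ⟨-, -, -, -, -, h6⟩ := h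
  rw [h6]
  rfl

-- ===== VERDICT (by name: the statement is the Claim_ definition above) =====
theorem clawsgravepeaks_spec : Claim_equal_clawsgravepeaks := by
  intro grid _ _
  exact pvMainEq grid
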